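-- pv_equiv track=rewrite | github.com/yhr0864/MA | cross_NAS/general_functions/.ipynb_checkpoints/prune_utils-checkpoint.py | generate_searchspace
-- ===== SOURCE A (Python) =====
-- def generate_searchspace(para, first_input):
--     channel_size = []
--     input_shape = [first_input]
--
--     for i in para:
--         if i[0] is not None:
--             channel_size.append(i[0])
--
--     for i in range(len(channel_size)-1):
--         input_shape.append(channel_size[i])
--
-- #     for i in para:
-- #         channel_size.append(i[-1])
-- #         if len(i) > 2:
-- #             prune.append((i[0], i[1]))
-- #         else:
-- #             prune.append(None)
--
-- #     if channel_size[0] is None: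
-- #         channel_size[0] = first_input
--
-- #     for i in range(1, len(channel_size)):
-- #         prev = channel_size[i-1]
-- #         current = channel_size[i]
-- #         if current is None:
-- #             channel_size[i] = prev
--
-- #     for i, j in enumerate(channel_size):
-- #         if i != len(channel_size)-1:
-- #             input_shape.append(j)
--     return input_shape, channel_size
-- ===== SOURCE B (Python) =====
-- def generate_searchspace(para, first_input):
--     # Traverse para in REVERSE, building both lists back-to-front:
--     # a channel goes into the shape list only if some channel already
--     # appeared to its right (i.e. it is not the last channel).
--     shape_r = []
--     chans_r = []
--     for row in reversed(para):
--         v = row[0]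
--         if v is not None:
--             if chans_r:
--                 shape_r.append(v)
--             chans_r.append(v)
--     shape_r.reverse()
--     chans_r.reverse()
--     return [first_input] + shape_r, chans_r
-- ===== Notes on version B (the rewrite author's own statement) =====
-- stated objective: alternative
-- what changed: Replaces A's forward filter pass plus an index loop over range(len(channel_size)-1) with a single reverse traversal of para that builds both lists back-to-front, admitting a channel into the shape list exactly when a channel has already been seen to its right, then reverses both.
-- outside the precondition, e.g. on generate_searchspace([[]], 3): A raises IndexError, B raises IndexError
import Mathlib
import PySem

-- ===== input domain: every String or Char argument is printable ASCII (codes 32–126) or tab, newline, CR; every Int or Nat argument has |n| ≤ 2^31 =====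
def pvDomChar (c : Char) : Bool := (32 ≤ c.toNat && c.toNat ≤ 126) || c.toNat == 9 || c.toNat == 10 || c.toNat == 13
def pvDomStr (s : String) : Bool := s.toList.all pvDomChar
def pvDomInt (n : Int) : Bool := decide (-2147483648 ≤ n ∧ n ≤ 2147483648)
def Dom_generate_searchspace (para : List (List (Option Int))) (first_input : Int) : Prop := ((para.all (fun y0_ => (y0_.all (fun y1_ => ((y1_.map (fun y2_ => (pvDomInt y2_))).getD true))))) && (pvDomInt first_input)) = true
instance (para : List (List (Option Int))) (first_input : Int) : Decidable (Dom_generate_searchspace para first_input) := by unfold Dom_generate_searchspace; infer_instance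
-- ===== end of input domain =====

-- B replaces A's forward filter pass + index loop by one REVERSE traversal of para
-- building both lists back-to-front, then reversing; same cost, different algorithm shape.

-- ===== PORT A =====
-- first loop body: channel_size.append(i[0]) when i[0] is not None (i[0] = pyGet?; none = IndexError, excluded by Pre_)
def pvStepA (cs : List Int) (i : List (Option Int)) : List Int :=
  match PySem.List.pyGet? i 0 with
  | some (some v) => cs ++ [v]
  | _ => cs
-- second loop: for i in range(len(channel_size)-1): input_shape.append(channel_size[i])
def generate_searchspace (para : List (List (Option Int))) (first_input : Int) : List Int × List Int :=
  let channel_size : List Int := para.foldl pvStepA []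
  let input_shape : List Int :=
    (PySem.List.pyRange 0 ((channel_size.length : Int) - 1) 1).foldl
      (fun sh k => sh ++ [PySem.List.pyGetD channel_size k 0]) [first_input]
  (input_shape, channel_size)

-- ===== PORT B =====
-- loop body over reversed(para): append v to chans_r, and to shape_r only if a
-- channel was already seen (to the right in the original order)
def pvStepB (st : List Int × List Int) (row : List (Option Int)) : List Int × List Int :=
  match PySem.List.pyGet? row 0 with
  | some (some v) => ((if st.2 ≠ [] then st.1 ++ [v] else st.1), st.2 ++ [v])
  | _ => st
def generate_searchspace_alt (para : List (List (Option Int))) (first_input : Int) : List Int × List Int :=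
  let st := para.reverse.foldl pvStepB ([], [])
  (first_input :: st.1.reverse, st.2.reverse)

-- ===== PRECONDITION & SPEC =====
-- Pre_ excludes exactly the inputs where Python A raises IndexError on i[0]: an empty inner list.
def Pre_generate_searchspace (para : List (List (Option Int))) (first_input : Int) : Prop :=
  ∀ i ∈ para, i ≠ []
instance (para : List (List (Option Int))) (first_input : Int) : Decidable (Pre_generate_searchspace para first_input) := by unfold Pre_generate_searchspace; infer_instance

def pvWitness_generate_searchspace : List (List (Option Int)) × Int := ([[some 1], [none], [some 2]], 5)

def Spec_generate_searchspace (para : List (List (Option Int))) (first_input : Int) (out : List Int × List Int) : Prop := out = generate_searchspace_alt para first_input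
instance (para : List (List (Option Int))) (first_input : Int) (out : List Int × List Int) : Decidable (Spec_generate_searchspace para first_input out) := by unfold Spec_generate_searchspace; infer_instance

-- ===== CLAIM (what is proved, stated in full; the proofs are below) =====
def Claim_equal_generate_searchspace : Prop := ∀ (para : List (List (Option Int))) (first_input : Int), Dom_generate_searchspace para first_input → Pre_generate_searchspace para first_input → Spec_generate_searchspace para first_input (generate_searchspace para first_input)

-- ===== LEMMAS AND PROOFS =====

-- the channels A's first loop (and B's reverse pass) collect, in traversal order
def pvFilt (para : List (List (Option Int))) : List Int :=
  para.filterMap (fun i =>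
    match PySem.List.pyGet? i 0 with
    | some (some v) => some v
    | _ => none)

theorem pvFilt_cons (i : List (Option Int)) (rest : List (List (Option Int))) :
    pvFilt (i :: rest) =
      (match PySem.List.pyGet? i 0 with
       | some (some v) => v :: pvFilt rest
       | _ => pvFilt rest) := by
  simp only [pvFilt, List.filterMap_cons]
  rcases h : PySem.List.pyGet? i 0 with _ | v
  · simp
  · rcases v with _ | v <;> simp

theorem foldlA_eq (para : List (List (Option Int))) :
    ∀ cs : List Int, para.foldl pvStepA cs = cs ++ pvFilt para := by
  induction para with
  | nil => intro cs; simp [pvFilt]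
  | cons i rest ih =>
      intro cs
      rw [List.foldl_cons, pvFilt_cons]
      rcases h : PySem.List.pyGet? i 0 with _ | v
      · simpa [pvStepA, h] using ih cs
      · rcases v with _ | v
        · simpa [pvStepA, h] using ih cs
        · simp only [pvStepA, h]
          rw [ih (cs ++ [v])]
          simp

theorem rangeLoop_eq (cs : List Int) (first_input : Int) :
    (PySem.List.pyRange 0 ((cs.length : Int) - 1) 1).foldl
      (fun sh k => sh ++ [PySem.List.pyGetD cs k 0]) [first_input] =
    first_input :: cs.dropLast := by
  rw [PySem.List.foldl_append_singleton_eq_map]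
  rcases cs.eq_nil_or_concat with rfl | ⟨ys, y, rfl⟩
  · simp [PySem.List.pyRange]
  ·
    simp only [List.concat_eq_append]
    have hlen : ((ys ++ [y]).length : Int) - 1 = (ys.length : Int) := by
      simp
    rw [hlen]
    have hcong : (PySem.List.pyRange 0 (ys.length : Int) 1).map
        (fun k => PySem.List.pyGetD (ys ++ [y]) k 0) =
        (PySem.List.pyRange 0 (ys.length : Int) 1).map
        (fun k => PySem.List.pyGetD ys k 0) := by
      apply List.map_congr_left
      intro k hk
      have hk' := (PySem.List.mem_pyRange_one).1 hk
      have h0 : 0 ≤ k := hk'.1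
      have h1 : k < (ys.length : Int) := hk'.2
      rw [PySem.List.pyGetD_eq_getElem (ys ++ [y]) 0 h0 (by simp; omega),
          PySem.List.pyGetD_eq_getElem ys 0 h0 (by omega)]
      rw [List.getElem_append_left]
    rw [hcong, PySem.List.map_pyGetD_pyRange_zero']
    simp

-- B's fold, once a channel has been seen: both components just accumulate the channels
theorem foldlB_nonempty (rows : List (List (Option Int))) :
    ∀ (sh cs : List Int), cs ≠ [] →
      rows.foldl pvStepB (sh, cs) = (sh ++ pvFilt rows, cs ++ pvFilt rows) := by
  induction rows with
  | nil => intro sh cs _; simp [pvFilt]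
  | cons i rest ih =>
      intro sh cs hcs
      rw [List.foldl_cons, pvFilt_cons]
      rcases h : PySem.List.pyGet? i 0 with _ | v
      · simpa [pvStepB, h] using ih sh cs hcs
      · rcases v with _ | v
        · simpa [pvStepB, h] using ih sh cs hcs
        · simp only [pvStepB, h, if_pos hcs]
          rw [ih (sh ++ [v]) (cs ++ [v]) (by simp)]
          simp

-- B's fold from the empty state: the shape part misses exactly the first channel
theorem foldlB_empty (rows : List (List (Option Int))) :
    rows.foldl pvStepB ([], []) = ((pvFilt rows).drop 1, pvFilt rows) := by
  induction rows with
  | nil => simp [pvFilt]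
  | cons i rest ih =>
      rw [List.foldl_cons, pvFilt_cons]
      rcases h : PySem.List.pyGet? i 0 with _ | v
      · simpa [pvStepB, h] using ih
      · rcases v with _ | v
        · simpa [pvStepB, h] using ih
        · simp only [pvStepB, h]
          rw [show (if ([] : List Int) ≠ [] then ([] : List Int) ++ [v] else []) = [] by simp]
          rw [foldlB_nonempty rest [] ([] ++ [v]) (by simp)]
          simp

theorem reverse_drop_one_reverse (l : List Int) :
    (l.reverse.drop 1).reverse = l.dropLast := by
  rcases l.eq_nil_or_concat with rfl | ⟨ys, y, rfl⟩
  · simp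
  · simp

-- ===== VERDICT (by name: the statement is the Claim_ definition above) =====
theorem generate_searchspace_spec : Claim_equal_generate_searchspace := by
  intro para first_input _ _
  unfold Spec_generate_searchspace
  simp only [generate_searchspace, generate_searchspace_alt]
  rw [foldlB_empty]
  simp only [foldlA_eq, List.nil_append, rangeLoop_eq]
  have hrev : pvFilt para.reverse = (pvFilt para).reverse := by
    simp [pvFilt, List.filterMap_reverse]
  rw [hrev, reverse_drop_one_reverse, List.reverse_reverse]
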